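-- pv_equiv track=rewrite | github.com/alebondarenko/comparely | System_demo/seq_lab/SeqLabeller.py | add_labels_for_bpe_suffix
-- ===== SOURCE A (Python) =====
-- def add_labels_for_bpe_suffix(labels, bpe_masks):
--     result_labels = []
--     for l_sent, m_sent in zip(labels, bpe_masks):
--         m_sent = m_sent
--         sent_res = []
--         i = 0
--         for l in l_sent:
--             sent_res.append(l)
--
--             i += 1
--             while i < len(m_sent) and (m_sent[i] == 0):
--                 i += 1
--                 sent_res.append('<pad>')
--
--         result_labels.append(sent_res)
--
--     return result_labels
-- ===== SOURCE B (Python) =====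
-- def add_labels_for_bpe_suffix(labels, bpe_masks):
--     result_labels = []
--     for l_sent, m_sent in zip(labels, bpe_masks):
--         # pass 1: segment table of zero-run lengths after each group boundary
--         pad_counts = []
--         j = 0
--         n = len(m_sent)
--         while j < n:
--             k = j + 1
--             while k < n and m_sent[k] == 0:
--                 k += 1
--             pad_counts.append(k - j - 1)
--             j = k
--         # pass 2: emit labels, padding each by its group's zero count
--         sent_res = []
--         for idx, l in enumerate(l_sent):
--             sent_res.append(l)
--             if idx < len(pad_counts):
--                 sent_res.extend(['<pad>'] * pad_counts[idx])
--         result_labels.append(sent_res)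
--     return result_labels
-- ===== Notes on version B (the rewrite author's own statement) =====
-- stated objective: alternative
-- what changed: A interleaves one two-pointer walk that emits a label then scans forward over zeros emitting pads; B first builds a per-group zero-count table from each mask in one pass, then in a second pass emits each enumerated label followed by its table entry of pads.
import Mathlib
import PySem

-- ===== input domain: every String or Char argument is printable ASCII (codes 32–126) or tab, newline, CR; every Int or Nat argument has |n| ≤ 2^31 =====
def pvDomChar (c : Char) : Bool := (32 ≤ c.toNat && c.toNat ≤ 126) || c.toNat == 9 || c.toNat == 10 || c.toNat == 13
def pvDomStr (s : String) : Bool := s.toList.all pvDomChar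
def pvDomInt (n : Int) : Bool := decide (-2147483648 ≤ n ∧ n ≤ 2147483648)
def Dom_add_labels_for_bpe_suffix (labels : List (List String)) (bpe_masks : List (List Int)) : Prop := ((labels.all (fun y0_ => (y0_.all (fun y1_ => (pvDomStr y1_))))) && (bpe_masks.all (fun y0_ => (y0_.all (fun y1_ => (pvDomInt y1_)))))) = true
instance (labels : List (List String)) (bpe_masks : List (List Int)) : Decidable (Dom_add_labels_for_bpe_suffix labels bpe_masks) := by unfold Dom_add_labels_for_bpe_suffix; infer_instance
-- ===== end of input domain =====

-- B replaces A's interleaved two-pointer walk by a two-pass decomposition (build a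
-- per-group zero-count table, then emit labels with their pads); objective: alternative.

-- ===== PORT A =====

-- the inner 'while i < len(m_sent) and m_sent[i] == 0' loop; i ≥ 0 always, so Nat index
-- and getD are exact (the default 1 is never read: the guard has i < m.length)
def whileA (m : List Int) (i : Nat) (acc : List String) : Nat × List String :=
  if h : i < m.length ∧ m.getD i 1 = 0 then whileA m (i + 1) (acc ++ ["<pad>"]) else (i, acc)
termination_by m.length - i
decreasing_by obtain ⟨h1, _⟩ := h; omega

-- body of A's outer 'for l_sent, m_sent in zip(...)': state (i, sent_res)
def sentA (l : List String) (m : List Int) : List String :=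
  (l.foldl (fun (st : Nat × List String) lab => whileA m (st.1 + 1) (st.2 ++ [lab])) (0, [])).2

def add_labels_for_bpe_suffix (labels : List (List String)) (bpe_masks : List (List Int)) : List (List String) :=
  (labels.zip bpe_masks).foldl (fun acc p => acc ++ [sentA p.1 p.2]) []

-- ===== PORT B =====

-- B's inner 'while k < n and m_sent[k] == 0: k += 1'
def skipB (m : List Int) (k : Nat) : Nat :=
  if h : k < m.length ∧ m.getD k 1 = 0 then skipB m (k + 1) else k
termination_by m.length - k
decreasing_by obtain ⟨h1, _⟩ := h; omega

theorem skipB_ge (m : List Int) (k : Nat) : k ≤ skipB m k := by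
  rw [skipB]
  split
  · have := skipB_ge m (k + 1); omega
  · exact Nat.le_refl k
termination_by m.length - k
decreasing_by rename_i h; obtain ⟨h1, _⟩ := h; omega

-- B's first pass: 'while j < n: k = skipB(j+1); pad_counts.append(k - j - 1); j = k'
def padTableB (m : List Int) (j : Nat) : List Nat :=
  if h : j < m.length then (skipB m (j + 1) - j - 1) :: padTableB m (skipB m (j + 1))
  else []
termination_by m.length - j
decreasing_by have := skipB_ge m (j + 1); omega

-- B's second pass: 'for idx, l in enumerate(l_sent): append l; if idx < len(pads): extend pads'
def emitB (l : List String) (pads : List Nat) : List String :=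
  (l.foldl (fun (st : Nat × List String) lab =>
      let r := st.2 ++ [lab]
      (st.1 + 1, if st.1 < pads.length then r ++ List.replicate (pads.getD st.1 0) "<pad>" else r))
    (0, [])).2

def add_labels_for_bpe_suffix_alt (labels : List (List String)) (bpe_masks : List (List Int)) : List (List String) :=
  (labels.zip bpe_masks).foldl (fun acc p => acc ++ [emitB p.1 (padTableB p.2 0)]) []

-- ===== PRECONDITION & SPEC =====
def Spec_add_labels_for_bpe_suffix (labels : List (List String)) (bpe_masks : List (List Int)) (out : List (List String)) : Prop := out = add_labels_for_bpe_suffix_alt labels bpe_masks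
instance (labels : List (List String)) (bpe_masks : List (List Int)) (out : List (List String)) : Decidable (Spec_add_labels_for_bpe_suffix labels bpe_masks out) := by unfold Spec_add_labels_for_bpe_suffix; infer_instance

-- ===== CLAIM (what is proved, stated in full; the proofs are below) =====
def Claim_equal_add_labels_for_bpe_suffix : Prop := ∀ (labels : List (List String)) (bpe_masks : List (List Int)), Dom_add_labels_for_bpe_suffix labels bpe_masks → Spec_add_labels_for_bpe_suffix labels bpe_masks (add_labels_for_bpe_suffix labels bpe_masks)

-- ===== LEMMAS AND PROOFS =====

-- common reference shape: each label followed by its group's pads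
def interleave : List String → List Nat → List String
  | [], _ => []
  | x :: ls, [] => x :: interleave ls []
  | x :: ls, c :: cs => x :: (List.replicate c "<pad>" ++ interleave ls cs)

theorem whileA_eq (m : List Int) (i : Nat) (acc : List String) :
    whileA m i acc = (skipB m i, acc ++ List.replicate (skipB m i - i) "<pad>") := by
  by_cases h : i < m.length ∧ m.getD i 1 = 0
  · have hs : skipB m i = skipB m (i + 1) := by rw [skipB, dif_pos h]
    rw [whileA, dif_pos h, whileA_eq m (i + 1), hs]
    have hge := skipB_ge m (i + 1)
    have h1 : skipB m (i + 1) - i = (skipB m (i + 1) - (i + 1)) + 1 := by omega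
    rw [h1, List.replicate_succ]
    simp
  · have hs : skipB m i = i := by rw [skipB, dif_neg h]
    rw [whileA, dif_neg h, hs]
    simp
termination_by m.length - i
decreasing_by obtain ⟨h1, _⟩ := h; omega

theorem foldA_eq (m : List Int) (l : List String) : ∀ (i : Nat) (res : List String),
    (l.foldl (fun (st : Nat × List String) lab => whileA m (st.1 + 1) (st.2 ++ [lab])) (i, res)).2
      = res ++ interleave l (padTableB m i) := by
  induction l with
  | nil => intro i res; simp [interleave]
  | cons x ls ih =>
    intro i res
    rw [List.foldl_cons, whileA_eq, ih]
    dsimp only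
    by_cases hp : i < m.length
    · conv_rhs => rw [padTableB, dif_pos hp]
      have h1 : skipB m (i + 1) - (i + 1) = skipB m (i + 1) - i - 1 := by omega
      simp [interleave, h1]
    · have hk : skipB m (i + 1) = i + 1 := by
        rw [skipB, dif_neg]; intro hc; exact hp (by omega)
      conv_rhs => rw [padTableB, dif_neg hp]
      rw [hk, padTableB, dif_neg (by omega : ¬ i + 1 < m.length)]
      simp [interleave]

theorem emit_go (pads : List Nat) (l : List String) : ∀ (s : Nat) (res : List String),
    (l.foldl (fun (st : Nat × List String) lab =>
        let r := st.2 ++ [lab]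
        (st.1 + 1, if st.1 < pads.length then r ++ List.replicate (pads.getD st.1 0) "<pad>" else r))
      (s, res)).2 = res ++ interleave l (pads.drop s) := by
  induction l with
  | nil => intro s res; simp [interleave]
  | cons x ls ih =>
    intro s res
    simp only [List.foldl_cons]
    by_cases h : s < pads.length
    · have hd : pads.drop s = pads.getD s 0 :: pads.drop (s + 1) := by
        rw [List.drop_eq_getElem_cons h, List.getD_eq_getElem _ _ h]
      simp only [if_pos h, ih, hd]
      simp [interleave]
    · have hd : pads.drop s = [] := List.drop_eq_nil_of_le (by omega)
      have hd1 : pads.drop (s + 1) = [] := List.drop_eq_nil_of_le (by omega)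
      simp only [if_neg h, ih, hd, hd1]
      simp [interleave]

theorem sent_eq (l : List String) (m : List Int) : sentA l m = emitB l (padTableB m 0) := by
  unfold sentA emitB
  rw [foldA_eq, emit_go]
  simp

-- ===== VERDICT (by name: the statement is the Claim_ definition above) =====
theorem add_labels_for_bpe_suffix_spec : Claim_equal_add_labels_for_bpe_suffix := by
  intro labels bpe_masks _
  unfold Spec_add_labels_for_bpe_suffix add_labels_for_bpe_suffix add_labels_for_bpe_suffix_alt
  rw [PySem.List.foldl_append_singleton_eq_map, PySem.List.foldl_append_singleton_eq_map]
  simp only [sent_eq]
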